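-- pv_equiv track=rewrite | github.com/Mich120232024/fundamental-data-manager | Engineering_Scripts/utilities/macro_economic_pipeline.py | _identify_economic_sections
-- ===== SOURCE A (Python) =====
-- from typing import Dict, List, Any, Optional
--
-- def _identify_economic_sections(text: str) -> List[tuple]:
--     """Identify economic sections in the document"""
--
--     lines = text.split('\n')
--     sections = []
--     current_section = None
--     current_content = []
--
--     economic_section_headers = [
--         'methodology', 'data sources', 'performance', 'applications',
--         'implementation', 'results', 'framework', 'analysis',
--         'economic indicators', 'policy', 'forecasting', 'networks'
--     ]
--
--     for line in lines:
--         line_lower = line.lower().strip()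
--
--         # Check if this is a section header
--         is_header = (line.startswith('#') or
--                     line.startswith('##') or
--                     any(header in line_lower for header in economic_section_headers))
--
--         if is_header and current_section is not None:
--             # Save previous section
--             sections.append((current_section, '\n'.join(current_content)))
--             current_content = []
--
--         if is_header:
--             current_section = line.strip()
--         else:
--             current_content.append(line)
--
--     # Add final section
--     if current_section:
--         sections.append((current_section, '\n'.join(current_content)))
--
--     return sections
-- ===== SOURCE B (Python) =====
-- from typing import List
--
-- def _identify_economic_sections(text: str) -> List[tuple]:
--     """Identify economic sections in the document (span-based scan)."""
--
--     economic_section_headers = [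
--         'methodology', 'data sources', 'performance', 'applications',
--         'implementation', 'results', 'framework', 'analysis',
--         'economic indicators', 'policy', 'forecasting', 'networks'
--     ]
--
--     def is_header(line: str) -> bool:
--         low = line.lower().strip()
--         return line.startswith('#') or any(h in low for h in economic_section_headers)
--
--     def split_at_header(ls):
--         # (prefix of non-header lines, rest starting at the first header)
--         for i, l in enumerate(ls):
--             if is_header(l):
--                 return ls[:i], ls[i:]
--         return ls, []
--
--     sections = []
--     pre, rest = split_at_header(text.split('\n'))
--     while rest:
--         head, tail = rest[0], rest[1:]
--         between, rest = split_at_header(tail)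
--         sections.append((head.strip(), '\n'.join(pre + between)))
--         pre = []
--     return sections
-- ===== Notes on version B (the rewrite author's own statement) =====
-- stated objective: alternative
-- what changed: Replaced A's stateful line-by-line fold carrying current_section/current_content accumulators with a span-based scan that repeatedly splits the line list at the next header and emits one (title, content) pair per header.
import Mathlib
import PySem

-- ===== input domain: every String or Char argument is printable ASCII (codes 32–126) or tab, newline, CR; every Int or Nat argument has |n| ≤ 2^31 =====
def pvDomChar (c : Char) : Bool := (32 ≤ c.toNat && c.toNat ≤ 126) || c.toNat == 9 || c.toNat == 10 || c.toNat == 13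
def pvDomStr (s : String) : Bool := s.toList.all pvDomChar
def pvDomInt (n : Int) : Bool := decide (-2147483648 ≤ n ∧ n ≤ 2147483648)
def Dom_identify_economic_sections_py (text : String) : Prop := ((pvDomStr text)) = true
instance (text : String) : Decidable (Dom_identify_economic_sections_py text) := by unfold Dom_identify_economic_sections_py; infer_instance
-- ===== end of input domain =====

-- B replaces A's stateful line-by-line fold (current_section/current_content accumulators)
-- by a span-based scan: split at the next header, emit (title, between-lines) per header;
-- objective: alternative decomposition, same O(n·k) cost.

-- ===== PORT A =====
def pvEconHeadersA : List String :=
  ["methodology", "data sources", "performance", "applications",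
   "implementation", "results", "framework", "analysis",
   "economic indicators", "policy", "forecasting", "networks"]

-- line.lower().strip(); '#'/'##' prefix or any keyword substring
def pvIsHeaderA (line : String) : Bool :=
  let line_lower := PySem.Str.strip (PySem.Str.lower line)
  PySem.Str.startswith line "#" || PySem.Str.startswith line "##" ||
    pvEconHeadersA.any (fun h => PySem.Str.isIn h line_lower)

-- one iteration of A's for-loop over (sections, current_section, current_content)
def pvStepA (st : List (String × String) × Option String × List String) (line : String) :
    List (String × String) × Option String × List String :=
  match st with
  | (sections, currentSection, currentContent) =>
    if pvIsHeaderA line then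
      match currentSection with
      | some s => (sections ++ [(s, PySem.Str.join "\n" currentContent)],
                   some (PySem.Str.strip line), [])
      | none => (sections, some (PySem.Str.strip line), currentContent)
    else (sections, currentSection, currentContent ++ [line])

-- 'if current_section:' — Python truthiness: present AND non-empty
def pvFinishA (st : List (String × String) × Option String × List String) :
    List (String × String) :=
  match st with
  | (sections, some s, content) =>
      if s = "" then sections else sections ++ [(s, PySem.Str.join "\n" content)]
  | (sections, none, _) => sections

def identify_economic_sections_py (text : String) : List (String × String) :=
  let lines := (PySem.Str.split? text "\n").getD []
  pvFinishA (lines.foldl pvStepA ([], none, []))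

-- ===== PORT B =====
def pvEconHeadersB : List String :=
  ["methodology", "data sources", "performance", "applications",
   "implementation", "results", "framework", "analysis",
   "economic indicators", "policy", "forecasting", "networks"]

def pvIsHeaderB (line : String) : Bool :=
  let low := PySem.Str.strip (PySem.Str.lower line)
  PySem.Str.startswith line "#" || pvEconHeadersB.any (fun h => PySem.Str.isIn h low)

-- (prefix of non-header lines, rest starting at the first header)
def pvSplitAtHeader (ls : List String) : List String × List String :=
  (ls.takeWhile (fun l => !pvIsHeaderB l), ls.dropWhile (fun l => !pvIsHeaderB l))

-- the while-loop of B: emit one section per header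
def pvGoB : List String → List String → List (String × String)
  | _, [] => []
  | pre, h :: tl =>
    let sp := pvSplitAtHeader tl
    (PySem.Str.strip h, PySem.Str.join "\n" (pre ++ sp.1)) :: pvGoB [] sp.2
termination_by _ rest => rest.length
decreasing_by
  simp only [pvSplitAtHeader]
  exact Nat.lt_succ_of_le (List.length_dropWhile_le _ _)

def identify_economic_sections_py_alt (text : String) : List (String × String) :=
  let lines := (PySem.Str.split? text "\n").getD []
  let sp := pvSplitAtHeader lines
  pvGoB sp.1 sp.2

-- ===== PRECONDITION & SPEC =====
def Spec_identify_economic_sections_py (text : String) (out : List (String × String)) : Prop := out = identify_economic_sections_py_alt text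
instance (text : String) (out : List (String × String)) : Decidable (Spec_identify_economic_sections_py text out) := by unfold Spec_identify_economic_sections_py; infer_instance

-- ===== CLAIM (what is proved, stated in full; the proofs are below) =====
def Claim_equal_identify_economic_sections_py : Prop := ∀ (text : String), Dom_identify_economic_sections_py text → Spec_identify_economic_sections_py text (identify_economic_sections_py text)

-- ===== LEMMAS AND PROOFS =====

-- lowercasing a character does not change whether it is whitespace
theorem pv_isspace_lowerChar (c : Char) :
    PySem.Chars.isspace (PySem.Chars.lowerChar c) = PySem.Chars.isspace c := by
  unfold PySem.Chars.lowerChar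
  split
  · rename_i h
    simp only [PySem.Chars.isupper, Bool.and_eq_true, decide_eq_true_eq] at h
    have h65 : 65 ≤ c.toNat := h.1
    have h90 : c.toNat ≤ 90 := h.2
    have hn : (Char.ofNat (c.toNat + 32)).toNat = c.toNat + 32 := by
      rw [Char.toNat_ofNat, if_pos (Or.inl (by omega : c.toNat + 32 < 55296))]
    unfold PySem.Chars.isspace
    rw [hn, Bool.eq_iff_iff]
    simp only [Bool.or_eq_true, Bool.and_eq_true, decide_eq_true_eq]
    omega
  · rfl

theorem pv_strip_eq_nil_iff (cs : List Char) :
    PySem.Chars.strip cs = [] ↔ ∀ c ∈ cs, PySem.Chars.isspace c = true := by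
  unfold PySem.Chars.strip PySem.Chars.rstrip PySem.Chars.lstrip
  constructor
  · intro h c hc
    have hdrop : ∀ x ∈ (List.dropWhile PySem.Chars.isspace cs), PySem.Chars.isspace x = true := by
      intro x hx
      have : x ∈ (List.dropWhile PySem.Chars.isspace cs).reverse := by simpa using hx
      have h2 : List.dropWhile PySem.Chars.isspace
          (List.dropWhile PySem.Chars.isspace cs).reverse = [] := by
        simpa using congrArg List.reverse h
      exact List.dropWhile_eq_nil_iff.mp h2 x (by simpa using this)
    have hc' : c ∈ List.takeWhile PySem.Chars.isspace cs ++ List.dropWhile PySem.Chars.isspace cs := by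
      rw [List.takeWhile_append_dropWhile (p := PySem.Chars.isspace)]; exact hc
    rcases List.mem_append.mp hc' with h1 | h1
    · exact List.mem_takeWhile_imp h1
    · exact hdrop c h1
  · intro h
    have : List.dropWhile PySem.Chars.isspace cs = [] :=
      List.dropWhile_eq_nil_iff.mpr h
    simp [this]

theorem pv_header_strip_ne (l : String) (hl : pvIsHeaderA l = true) :
    PySem.Str.strip l ≠ "" := by
  intro he
  have hnil : PySem.Chars.strip l.toList = [] := by
    have h := congrArg String.toList he
    simpa using h
  have hall : ∀ c ∈ l.toList, PySem.Chars.isspace c = true := (pv_strip_eq_nil_iff _).mp hnil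
  unfold pvIsHeaderA at hl
  simp only [Bool.or_eq_true] at hl
  have hashCase : ∀ (p : String), PySem.Str.startswith l p = true → "#".toList <+: p.toList →
      False := by
    intro p hp hpp
    have h1 : p.toList <+: l.toList := by
      have := (PySem.Chars.startswith_iff l.toList p.toList).mp (by simpa using hp)
      exact this
    have h2 : ('#' : Char) ∈ l.toList := (hpp.trans h1).subset (by decide)
    have h3 := hall '#' h2
    have hf : PySem.Chars.isspace '#' = false := by decide
    rw [hf] at h3
    exact absurd h3 (by decide)
  rcases hl with (h1 | h1) | h1
  · exact hashCase "#" h1 (by decide)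
  · exact hashCase "##" h1 (by decide)
  · obtain ⟨k, hk, hin⟩ := List.any_eq_true.mp h1
    have hinf : k.toList <:+: (PySem.Str.strip (PySem.Str.lower l)).toList :=
      (PySem.Str.isIn_iff_infix _ _).mp hin
    have hz : PySem.Chars.strip (PySem.Chars.lower l.toList) = [] := by
      apply (pv_strip_eq_nil_iff _).mpr
      intro c hc
      simp only [PySem.Chars.lower, List.mem_map] at hc
      obtain ⟨c0, hc0, rfl⟩ := hc
      rw [pv_isspace_lowerChar]; exact hall c0 hc0
    rw [PySem.Str.toList_strip, PySem.Str.toList_lower, hz] at hinf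
    have hkn : k.toList = [] := by simpa using hinf
    have hne : k.toList ≠ [] := by fin_cases hk <;> decide
    exact hne hkn

theorem pv_isHeader_BA (l : String) : pvIsHeaderB l = pvIsHeaderA l := by
  unfold pvIsHeaderA pvIsHeaderB pvEconHeadersA pvEconHeadersB
  by_cases h1 : PySem.Str.startswith l "#" = true
  · simp only [h1, Bool.true_or]
  · have h1' : PySem.Str.startswith l "#" = false := by simpa using h1
    have h2 : PySem.Str.startswith l "##" = false := by
      rw [← Bool.not_eq_true]
      intro hc
      apply h1
      have hp : ("##".toList : List Char) <+: l.toList :=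
        (PySem.Chars.startswith_iff _ _).mp (by simpa using hc)
      have hp1 : ("#".toList : List Char) <+: l.toList :=
        (by decide : ("#".toList : List Char) <+: "##".toList).trans hp
      have := (PySem.Chars.startswith_iff l.toList "#".toList).mpr hp1
      simpa using this
    simp only [h1', h2, Bool.false_or]

theorem pv_notBA : (fun l => !pvIsHeaderB l) = (fun l => !pvIsHeaderA l) := by
  funext l; rw [pv_isHeader_BA]

theorem pv_L1 (ls : List String) : ∀ (secs : List (String × String)) (s : String)
    (c : List String), s ≠ "" →
    pvFinishA (ls.foldl pvStepA (secs, some s, c)) =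
      secs ++ (s, PySem.Str.join "\n" (c ++ ls.takeWhile (fun l => !pvIsHeaderA l))) ::
        pvGoB [] (ls.dropWhile (fun l => !pvIsHeaderA l)) := by
  induction ls with
  | nil => intro secs s c hs; simp [pvFinishA, pvGoB, hs]
  | cons l ls ih =>
    intro secs s c hs
    by_cases hl : pvIsHeaderA l = true
    · simp only [List.foldl_cons, pvStepA, hl, if_pos]
      rw [ih (secs ++ [(s, PySem.Str.join "\n" c)]) (PySem.Str.strip l) []
        (pv_header_strip_ne l hl)]
      simp [pvGoB, pvSplitAtHeader, pv_notBA, hl]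
    · have hl' : pvIsHeaderA l = false := by simpa using hl
      simp only [List.foldl_cons, pvStepA, hl', Bool.false_eq_true, if_false]
      rw [ih secs s (c ++ [l]) hs]
      simp [hl']

theorem pv_L2 (ls : List String) : ∀ (c : List String),
    pvFinishA (ls.foldl pvStepA ([], none, c)) =
      pvGoB (c ++ ls.takeWhile (fun l => !pvIsHeaderA l))
        (ls.dropWhile (fun l => !pvIsHeaderA l)) := by
  induction ls with
  | nil => intro c; simp [pvFinishA, pvGoB]
  | cons l ls ih =>
    intro c
    by_cases hl : pvIsHeaderA l = true
    · simp only [List.foldl_cons, pvStepA, hl, if_pos]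
      rw [pv_L1 ls [] (PySem.Str.strip l) c (pv_header_strip_ne l hl)]
      simp [pvGoB, pvSplitAtHeader, pv_notBA, hl]
    · have hl' : pvIsHeaderA l = false := by simpa using hl
      simp only [List.foldl_cons, pvStepA, hl', Bool.false_eq_true, if_false]
      rw [ih (c ++ [l])]
      simp [hl']

-- ===== VERDICT (by name: the statement is the Claim_ definition above) =====
theorem identify_economic_sections_py_spec : Claim_equal_identify_economic_sections_py := by
  intro text _
  unfold Spec_identify_economic_sections_py
  unfold identify_economic_sections_py identify_economic_sections_py_alt pvSplitAtHeader
  simp only [pv_notBA]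
  rw [pv_L2]
  simp
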